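-- pv_equiv track=rewrite | github.com/probapraise/project_dream2 | scripts/writing/refresh_canon_metadata.py | replace_or_insert
-- ===== SOURCE A (Python) =====
-- def replace_or_insert(lines: list[str], key: str, value: str, after_key: str | None = None) -> list[str]:
--     target_prefix = f"- {key}:"
--     new_line = f"- {key}: {value}"
--     for index, line in enumerate(lines):
--         if line.startswith(target_prefix):
--             lines[index] = new_line
--             return lines
--     if after_key is not None:
--         after_prefix = f"- {after_key}:"
--         for index, line in enumerate(lines):
--             if line.startswith(after_prefix):
--                 lines.insert(index + 1, new_line)
--                 return lines
--     insert_at = 0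
--     for index, line in enumerate(lines):
--         if line.startswith("## "):
--             insert_at = index
--             break
--     lines.insert(insert_at, new_line)
--     return lines
-- ===== SOURCE B (Python) =====
-- def replace_or_insert(lines: list[str], key: str, value: str, after_key: str | None = None) -> list[str]:
--     target_prefix = f"- {key}:"
--     new_line = f"- {key}: {value}"
--     after_prefix = f"- {after_key}:" if after_key is not None else None
--     target_idx = after_idx = heading_idx = None
--     for index, line in enumerate(lines):
--         if target_idx is None and line.startswith(target_prefix):
--             target_idx = index
--         if after_prefix is not None and after_idx is None and line.startswith(after_prefix):
--             after_idx = index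
--         if heading_idx is None and line.startswith("## "):
--             heading_idx = index
--     if target_idx is not None:
--         lines[target_idx] = new_line
--     elif after_idx is not None:
--         lines.insert(after_idx + 1, new_line)
--     else:
--         lines.insert(heading_idx if heading_idx is not None else 0, new_line)
--     return lines
-- ===== Notes on version B (the rewrite author's own statement) =====
-- stated objective: alternative
-- what changed: Replaces A's three sequential early-exit scans with a single pass over enumerate(lines) that records the first target/after/heading match indices, then applies the priority once after the loop.
import Mathlib
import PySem

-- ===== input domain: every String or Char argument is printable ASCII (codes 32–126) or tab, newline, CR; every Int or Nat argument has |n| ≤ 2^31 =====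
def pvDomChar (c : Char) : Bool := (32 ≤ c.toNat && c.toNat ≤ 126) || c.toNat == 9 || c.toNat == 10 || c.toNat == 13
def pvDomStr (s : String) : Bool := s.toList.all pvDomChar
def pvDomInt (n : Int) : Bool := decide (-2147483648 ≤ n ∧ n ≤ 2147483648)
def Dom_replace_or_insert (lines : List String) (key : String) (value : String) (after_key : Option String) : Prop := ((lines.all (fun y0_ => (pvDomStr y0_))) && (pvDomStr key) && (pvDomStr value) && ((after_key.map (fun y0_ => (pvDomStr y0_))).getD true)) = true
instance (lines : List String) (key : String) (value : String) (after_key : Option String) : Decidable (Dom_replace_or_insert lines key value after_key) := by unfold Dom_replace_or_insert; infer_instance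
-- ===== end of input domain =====

-- B replaces A's three sequential early-exit scans with ONE pass recording the first
-- target/after/heading match indices, then applies the priority once (alternative decomposition,
-- same O(n) cost). Both Pythons mutate `lines` in place the same way; the equivalence proved
-- here is about the RETURN value.

-- ===== PORT A =====
-- first loop: replace the first line starting with target_prefix (index assignment is in range, so List.set is exact)
def aLoop1 (lines : List String) (pre nl : String) : Nat → List String → Option (List String)
  | _, [] => none
  | i, l :: ls =>
    if PySem.Str.startswith l pre then some (lines.set i nl)
    else aLoop1 lines pre nl (i + 1) ls

-- second loop: insert after the first line starting with after_prefix
def aLoop2 (lines : List String) (pre nl : String) : Nat → List String → Option (List String)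
  | _, [] => none
  | i, l :: ls =>
    if PySem.Str.startswith l pre then some (PySem.List.insert lines ((i : Int) + 1) nl)
    else aLoop2 lines pre nl (i + 1) ls

-- third loop: insert_at = first index of a '## ' line, else the initial 0
def aLoop3 : Nat → List String → Nat
  | _, [] => 0
  | i, l :: ls => if PySem.Str.startswith l "## " then i else aLoop3 (i + 1) ls

def replace_or_insert (lines : List String) (key : String) (value : String) (after_key : Option String) : List String :=
  let target_prefix := "- " ++ key ++ ":"
  let new_line := "- " ++ key ++ ": " ++ value
  match aLoop1 lines target_prefix new_line 0 lines with
  | some r => r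
  | none =>
    match after_key with
    | some ak =>
      let after_prefix := "- " ++ ak ++ ":"
      match aLoop2 lines after_prefix new_line 0 lines with
      | some r => r
      | none => PySem.List.insert lines ((aLoop3 0 lines : Nat) : Int) new_line
    | none => PySem.List.insert lines ((aLoop3 0 lines : Nat) : Int) new_line

-- ===== PORT B =====
def replace_or_insert_alt (lines : List String) (key : String) (value : String) (after_key : Option String) : List String :=
  let target_prefix := "- " ++ key ++ ":"
  let new_line := "- " ++ key ++ ": " ++ value
  let after_prefix : Option String := after_key.map (fun ak => "- " ++ ak ++ ":")
  let st :=
    List.foldl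
      (fun (s : Option Nat × Option Nat × Option Nat) (q : String × Nat) =>
        (if s.1.isNone && PySem.Str.startswith q.1 target_prefix then some q.2 else s.1,
         if after_prefix.isSome && s.2.1.isNone && PySem.Str.startswith q.1 (after_prefix.getD "") then some q.2 else s.2.1,
         if s.2.2.isNone && PySem.Str.startswith q.1 "## " then some q.2 else s.2.2))
      (none, none, none) (List.zipIdx lines 0)
  match st.1 with
  | some t => lines.set t new_line
  | none =>
    match st.2.1 with
    | some a => PySem.List.insert lines ((a : Int) + 1) new_line
    | none => PySem.List.insert lines ((st.2.2.getD 0 : Nat) : Int) new_line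

-- ===== PRECONDITION & SPEC =====
def Spec_replace_or_insert (lines : List String) (key : String) (value : String) (after_key : Option String) (out : List String) : Prop := out = replace_or_insert_alt lines key value after_key
instance (lines : List String) (key : String) (value : String) (after_key : Option String) (out : List String) : Decidable (Spec_replace_or_insert lines key value after_key out) := by unfold Spec_replace_or_insert; infer_instance

-- ===== CLAIM (what is proved, stated in full; the proofs are below) =====
def Claim_equal_replace_or_insert : Prop := ∀ (lines : List String) (key : String) (value : String) (after_key : Option String), Dom_replace_or_insert lines key value after_key → Spec_replace_or_insert lines key value after_key (replace_or_insert lines key value after_key)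

-- ===== LEMMAS AND PROOFS =====

-- the first index ≥ i (in absolute numbering) of a line satisfying p
def fstIdx (p : String → Bool) : Nat → List String → Option Nat
  | _, [] => none
  | i, l :: ls => if p l then some i else fstIdx p (i + 1) ls

theorem fstIdx_false (i : Nat) (ls : List String) : fstIdx (fun _ => false) i ls = none := by
  induction ls generalizing i with
  | nil => rfl
  | cons l ls ih => simp [fstIdx, ih]

theorem aLoop1_eq (lines : List String) (pre nl : String) (ls : List String) (i : Nat) :
    aLoop1 lines pre nl i ls
      = (fstIdx (fun l => PySem.Str.startswith l pre) i ls).map (fun j => lines.set j nl) := by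
  induction ls generalizing i with
  | nil => rfl
  | cons l ls ih => simp only [aLoop1, fstIdx]; split <;> simp [ih]

theorem aLoop2_eq (lines : List String) (pre nl : String) (ls : List String) (i : Nat) :
    aLoop2 lines pre nl i ls
      = (fstIdx (fun l => PySem.Str.startswith l pre) i ls).map
          (fun j => PySem.List.insert lines ((j : Int) + 1) nl) := by
  induction ls generalizing i with
  | nil => rfl
  | cons l ls ih => simp only [aLoop2, fstIdx]; split <;> simp [ih]

theorem aLoop3_eq (ls : List String) (i : Nat) :
    aLoop3 i ls = (fstIdx (fun l => PySem.Str.startswith l "## ") i ls).getD 0 := by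
  induction ls generalizing i with
  | nil => rfl
  | cons l ls ih => simp only [aLoop3, fstIdx]; split <;> simp [ih]

-- B's single fold computes the three first-match indices
theorem scan3 (pt : String) (ap : Option String) (ls : List String) (i : Nat)
    (s : Option Nat × Option Nat × Option Nat) :
    List.foldl
      (fun (s : Option Nat × Option Nat × Option Nat) (q : String × Nat) =>
        (if s.1.isNone && PySem.Str.startswith q.1 pt then some q.2 else s.1,
         if ap.isSome && s.2.1.isNone && PySem.Str.startswith q.1 (ap.getD "") then some q.2 else s.2.1,
         if s.2.2.isNone && PySem.Str.startswith q.1 "## " then some q.2 else s.2.2))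
      s (List.zipIdx ls i)
    = (s.1.orElse (fun _ => fstIdx (fun l => PySem.Str.startswith l pt) i ls),
       s.2.1.orElse (fun _ => fstIdx (fun l => ap.isSome && PySem.Str.startswith l (ap.getD "")) i ls),
       s.2.2.orElse (fun _ => fstIdx (fun l => PySem.Str.startswith l "## ") i ls)) := by
  induction ls generalizing i s with
  | nil => obtain ⟨t, a, h⟩ := s; simp [fstIdx]
  | cons l ls ih =>
    obtain ⟨t, a, h⟩ := s
    rw [List.zipIdx_cons, List.foldl_cons, ih]
    refine Prod.ext ?_ (Prod.ext ?_ ?_) <;> dsimp only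
    · cases t with
      | some v => simp [fstIdx]
      | none =>
        simp only [fstIdx, Option.isNone_none, Bool.true_and]
        split <;> simp_all
    · cases a with
      | some v => simp [fstIdx]
      | none =>
        simp only [fstIdx, Option.isNone_none]
        split <;> simp_all
    · cases h with
      | some v => simp [fstIdx]
      | none =>
        simp only [fstIdx, Option.isNone_none, Bool.true_and]
        split <;> simp_all

-- ===== VERDICT (by name: the statement is the Claim_ definition above) =====
theorem replace_or_insert_spec : Claim_equal_replace_or_insert := by
  intro lines key value after_key _
  unfold Spec_replace_or_insert
  cases after_key with
  | none =>
    simp only [replace_or_insert, replace_or_insert_alt]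
    rw [scan3, aLoop1_eq, aLoop3_eq]
    simp only [Option.map_none, Option.isSome_none, Bool.false_and, fstIdx_false]
    cases h1 : fstIdx (fun l => PySem.Str.startswith l ("- " ++ key ++ ":")) 0 lines <;> simp
  | some ak =>
    simp only [replace_or_insert, replace_or_insert_alt]
    rw [scan3, aLoop1_eq, aLoop2_eq, aLoop3_eq]
    simp only [Option.map_some, Option.isSome_some, Bool.true_and, Option.getD_some]
    cases h1 : fstIdx (fun l => PySem.Str.startswith l ("- " ++ key ++ ":")) 0 lines with
    | some t => simp
    | none =>
      cases h2 : fstIdx (fun l => PySem.Str.startswith l ("- " ++ ak ++ ":")) 0 lines <;> simp
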